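-- pv_equiv track=rewrite | github.com/SujeongLeee/baekjoon | probs_set/samsung_sw_test/2_16236.py | find_non_zeroes
-- ===== SOURCE A (Python) =====
-- def find_non_zeroes(space):
--     non_zeroes = {}
--     for i in range(len(space)):
--         for j in range(len(space[i])):
--             if space[i][j] != 0:
--                 if space[i][j] in non_zeroes.keys():
--                     non_zeroes[space[i][j]].append([i, j])
--                 else:
--                     non_zeroes[space[i][j]] = [[i, j]]
--     return non_zeroes
-- ===== SOURCE B (Python) =====
-- def find_non_zeroes(space):
--     flat = [(v, [i, j]) for i, row in enumerate(space) for j, v in enumerate(row) if v != 0]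
--     keys = list(dict.fromkeys(v for v, _ in flat))
--     return {k: [c for v, c in flat if v == k] for k in keys}
-- ===== Notes on version B (the rewrite author's own statement) =====
-- stated objective: alternative
-- what changed: Replaces the nested index loops with incremental dict-bucket mutation by a materialize-then-group pipeline: flatten the grid into a (value, coordinate) list, dedup the values in first-occurrence order, and build each group by a comprehension over the flat list.
import Mathlib
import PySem

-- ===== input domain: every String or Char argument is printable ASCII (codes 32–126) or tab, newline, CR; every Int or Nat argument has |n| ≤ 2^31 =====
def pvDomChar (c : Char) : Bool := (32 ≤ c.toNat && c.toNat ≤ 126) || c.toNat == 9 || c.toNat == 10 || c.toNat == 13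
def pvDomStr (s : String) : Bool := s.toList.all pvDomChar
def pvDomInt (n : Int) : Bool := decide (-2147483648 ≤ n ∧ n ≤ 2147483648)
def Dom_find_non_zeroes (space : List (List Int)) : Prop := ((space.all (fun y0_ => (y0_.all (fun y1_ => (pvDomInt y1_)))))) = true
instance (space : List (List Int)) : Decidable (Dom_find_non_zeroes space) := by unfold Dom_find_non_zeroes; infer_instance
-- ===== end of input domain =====

-- B replaces A's incremental dict-bucket mutation in nested index loops by a flatten / dedup-keys / group-by-comprehension pipeline (same task, different algorithm).

-- ===== PORT A =====
def find_non_zeroes (space : List (List Int)) : List (Int × List (List Int)) :=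
  ((PySem.List.pyRange 0 (PySem.List.len space)).foldl (fun d i =>
    (PySem.List.pyRange 0 (PySem.List.len (PySem.List.pyGetD space i []))).foldl (fun d j =>
      if PySem.List.pyGetD (PySem.List.pyGetD space i []) j 0 ≠ 0 then
        (if d.contains (PySem.List.pyGetD (PySem.List.pyGetD space i []) j 0) then
          d.modify (PySem.List.pyGetD (PySem.List.pyGetD space i []) j 0) [] (fun l => l ++ [[i, j]])
        else
          d.insert (PySem.List.pyGetD (PySem.List.pyGetD space i []) j 0) [[i, j]])
      else d) d)
    (PySem.Dict.empty : PySem.Dict Int (List (List Int)))).items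

-- ===== PORT B =====
-- B's 'flat' comprehension: every non-zero cell as (value, [i, j]), row-major
def pvFlat (space : List (List Int)) : List (Int × List Int) :=
  (PySem.List.enumerate space).flatMap (fun p =>
    (PySem.List.enumerate p.2).filterMap (fun q =>
      if q.2 ≠ 0 then some (q.2, [p.1, q.1]) else none))

def find_non_zeroes_alt (space : List (List Int)) : List (Int × List (List Int)) :=
  (PySem.List.dedup ((pvFlat space).map (fun p => p.1))).map (fun k =>
    (k, ((pvFlat space).filter (fun p => p.1 == k)).map (fun p => p.2)))

-- ===== PRECONDITION & SPEC =====
def Spec_find_non_zeroes (space : List (List Int)) (out : List (Int × List (List Int))) : Prop := out = find_non_zeroes_alt space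
instance (space : List (List Int)) (out : List (Int × List (List Int))) : Decidable (Spec_find_non_zeroes space out) := by unfold Spec_find_non_zeroes; infer_instance

-- ===== CLAIM (what is proved, stated in full; the proofs are below) =====
def Claim_equal_find_non_zeroes : Prop := ∀ (space : List (List Int)), Dom_find_non_zeroes space → Spec_find_non_zeroes space (find_non_zeroes space)

-- ===== LEMMAS AND PROOFS =====

-- a fold over range(len(xs)) reading xs[j] is a fold over enumerate(xs, s)
theorem range_foldl_enum_gen {α δ : Type} (xs : List α) (dflt : α) (s : Int) (G : δ → Int → α → δ) (d : δ) :
    (List.range xs.length).foldl (fun d (j : Nat) => G d (s + (j : Int)) (xs.getD j dflt)) d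
    = (PySem.List.enumerate xs s).foldl (fun d q => G d q.1 q.2) d := by
  induction xs generalizing s d with
  | nil => simp [PySem.List.enumerate]
  | cons x t ih =>
    simp only [List.length_cons, List.range_succ_eq_map, List.foldl_cons, List.foldl_map,
      PySem.List.enumerate]
    rw [show (fun (a : δ) (j : Nat) => G a (s + ((j.succ : Nat) : Int)) ((x :: t).getD j.succ dflt))
        = (fun (a : δ) (j : Nat) => G a ((s + 1) + (j : Int)) (t.getD j dflt)) by
      funext a j
      have hc : s + ((j.succ : Nat) : Int) = (s + 1) + (j : Int) := by push_cast; ring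
      rw [hc]; rfl]
    have h0 : G d (s + ((0 : Nat) : Int)) ((x :: t).getD 0 dflt) = G d s x := by norm_num
    rw [h0]
    exact ih (s + 1) (G d s x)

theorem pyRange_foldl_enum {α δ : Type} (xs : List α) (dflt : α) (G : δ → Int → α → δ) (d : δ) :
    (PySem.List.pyRange 0 (PySem.List.len xs)).foldl (fun d j => G d j (PySem.List.pyGetD xs j dflt)) d
    = (PySem.List.enumerate xs 0).foldl (fun d q => G d q.1 q.2) d := by
  have h : PySem.List.len xs = ((xs.length : Nat) : Int) := by simp [PySem.List.len]
  rw [h, PySem.List.pyRange_zero_natCast, List.foldl_map]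
  rw [show (fun (a : δ) (k : Nat) => G a (k : Int) (PySem.List.pyGetD xs (k : Int) dflt))
      = (fun (a : δ) (k : Nat) => G a (0 + (k : Int)) (xs.getD k dflt)) by
    funext a k; rw [PySem.List.pyGetD_natCast, Int.zero_add]]
  exact range_foldl_enum_gen xs dflt 0 G d

-- A's dict step (append-or-create) is one Python-style modify
theorem step_eq_modify (d : PySem.Dict Int (List (List Int))) (v : Int) (c : List Int) :
    (if d.contains v then d.modify v [] (fun l => l ++ [c]) else d.insert v [c])
    = d.modify v [] (fun l => l ++ [c]) := by
  by_cases h : d.contains v = true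
  · simp [h]
  · have hf : d.contains v = false := by simpa using h
    simp [h, PySem.Dict.modify, PySem.Dict.getD_of_not_contains d [] hf]

theorem filterMap_if_eq_map_filter {α β : Type} (p : α → Prop) [DecidablePred p] (f : α → β) (l : List α) :
    l.filterMap (fun q => if p q then some (f q) else none)
    = (l.filter (fun q => decide (p q))).map f := by
  induction l with
  | nil => rfl
  | cons x t ih =>
    by_cases h : p x <;> simp [h, ih]

-- the inner loop over one row, as a modify-fold over the row's non-zero (value, coordinate) pairs
theorem inner_loop_eq (i : Int) (row : List Int) (d : PySem.Dict Int (List (List Int))) :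
    (PySem.List.pyRange 0 (PySem.List.len row)).foldl (fun d j =>
      if PySem.List.pyGetD row j 0 ≠ 0 then
        (if d.contains (PySem.List.pyGetD row j 0) then
          d.modify (PySem.List.pyGetD row j 0) [] (fun l => l ++ [[i, j]])
        else d.insert (PySem.List.pyGetD row j 0) [[i, j]])
      else d) d
    = ((PySem.List.enumerate row).filterMap (fun q =>
        if q.2 ≠ 0 then some (q.2, [i, q.1]) else none)).foldl
        (fun d p => d.modify p.1 [] (fun l => l ++ [p.2])) d := by
  have h1 := pyRange_foldl_enum row 0
    (fun d j v =>
      if v ≠ 0 then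
        (if d.contains v then d.modify v [] (fun l => l ++ [[i, j]])
         else d.insert v [[i, j]])
      else d) d
  rw [h1]
  rw [filterMap_if_eq_map_filter (fun q : Int × Int => q.2 ≠ 0) (fun q : Int × Int => (q.2, [i, q.1]))]
  rw [List.foldl_map]
  have h2 := PySem.List.foldl_ite_eq_foldl_filter (fun q : Int × Int => q.2 ≠ 0)
    (fun d (q : Int × Int) =>
      if d.contains q.2 then d.modify q.2 [] (fun l => l ++ [[i, q.1]])
      else d.insert q.2 [[i, q.1]]) (PySem.List.enumerate row) d
  rw [h2]
  exact PySem.List.foldl_congr_mem _ _ _ d (fun acc q _ => step_eq_modify acc q.2 [i, q.1])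

-- ===== VERDICT (by name: the statement is the Claim_ definition above) =====
theorem find_non_zeroes_spec : Claim_equal_find_non_zeroes := by
  intro space _
  unfold Spec_find_non_zeroes find_non_zeroes find_non_zeroes_alt
  -- outer loop → fold over enumerate(space)
  have houter := pyRange_foldl_enum space []
    (fun d (i : Int) (row : List Int) =>
      (PySem.List.pyRange 0 (PySem.List.len row)).foldl (fun d j =>
        if PySem.List.pyGetD row j 0 ≠ 0 then
          (if d.contains (PySem.List.pyGetD row j 0) then
            d.modify (PySem.List.pyGetD row j 0) [] (fun l => l ++ [[i, j]])
          else d.insert (PySem.List.pyGetD row j 0) [[i, j]])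
        else d) d)
    (PySem.Dict.empty : PySem.Dict Int (List (List Int)))
  rw [houter]
  -- each row's loop → its modify-fold
  have hrows := PySem.List.foldl_congr_mem (PySem.List.enumerate space)
    (fun (d : PySem.Dict Int (List (List Int))) (p : Int × List Int) =>
      (PySem.List.pyRange 0 (PySem.List.len p.2)).foldl (fun d j =>
        if PySem.List.pyGetD p.2 j 0 ≠ 0 then
          (if d.contains (PySem.List.pyGetD p.2 j 0) then
            d.modify (PySem.List.pyGetD p.2 j 0) [] (fun l => l ++ [[p.1, j]])
          else d.insert (PySem.List.pyGetD p.2 j 0) [[p.1, j]])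
        else d) d)
    (fun d p =>
      ((PySem.List.enumerate p.2).filterMap (fun q =>
        if q.2 ≠ 0 then some (q.2, [p.1, q.1]) else none)).foldl
        (fun d p => d.modify p.1 [] (fun l => l ++ [p.2])) d)
    (PySem.Dict.empty : PySem.Dict Int (List (List Int)))
    (fun acc p _ => inner_loop_eq p.1 p.2 acc)
  rw [hrows]
  -- the nested fold is one fold over the flattened pair list
  have hflat : (PySem.List.enumerate space).foldl
      (fun (d : PySem.Dict Int (List (List Int))) (p : Int × List Int) =>
        ((PySem.List.enumerate p.2).filterMap (fun q =>
          if q.2 ≠ 0 then some (q.2, [p.1, q.1]) else none)).foldl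
          (fun d p => d.modify p.1 [] (fun l => l ++ [p.2])) d)
      PySem.Dict.empty
      = (pvFlat space).foldl (fun d p => d.modify p.1 [] (fun l => l ++ [p.2]))
          PySem.Dict.empty := by
    rw [pvFlat, List.foldl_flatMap]
  rw [hflat]
  -- characterize the final dict's items list
  have hnd : ((pvFlat space).foldl (fun d p => d.modify p.1 [] (fun l => l ++ [p.2]))
      (PySem.Dict.empty : PySem.Dict Int (List (List Int)))).keys.Nodup :=
    PySem.Dict.nodup_keys_foldl_modify_key (pvFlat space) Prod.fst []
      (fun _ p => fun l => l ++ [p.2]) _ (by simp [PySem.Dict.keys_empty])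
  rw [PySem.Dict.items_eq_map_keys _ hnd []]
  have hkeys := PySem.Dict.keys_foldl_modify_key (pvFlat space) Prod.fst []
    (fun (_ : PySem.Dict Int (List (List Int))) (p : Int × List Int) => fun l => l ++ [p.2])
    PySem.Dict.empty
  rw [hkeys]
  have hkeys2 : PySem.Set.update (PySem.Dict.empty : PySem.Dict Int (List (List Int))).keys
      ((pvFlat space).map Prod.fst) = PySem.List.dedup ((pvFlat space).map (fun p => p.1)) := by
    simp [PySem.Set.update, PySem.Dict.keys_empty, PySem.List.dedup_eq_ofList, PySem.Set.ofList]
  rw [hkeys2]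
  refine List.map_congr_left (fun k _ => ?_)
  have hget := PySem.Dict.getD_foldl_modify_append (pvFlat space)
    (PySem.Dict.empty : PySem.Dict Int (List (List Int))) k
  rw [hget]
  simp [PySem.Dict.getD_empty]
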